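-- pv_equiv track=rewrite | github.com/cesarinetati/star | star.py | fusionneLignes
-- ===== SOURCE A (Python) =====
-- def fusionneLignes(l1, l2):
--     while len(l1) < len(l2):
--         l1 += " "
--
--     while len(l2) < len(l1):
--         l2 += " "
--     line = ""
--     for mot1, mot2 in zip(l1, l2):
--         if (mot1 == "*" or mot2 == "*"):
--             line += "*"
--         else:
--             line += " "
--     return line
-- ===== SOURCE B (Python) =====
-- def fusionneLignes(l1, l2):
--     stars = {i for i, c in enumerate(l1) if c == "*"}
--     stars |= {i for i, c in enumerate(l2) if c == "*"}
--     n = max(len(l1), len(l2))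
--     return "".join("*" if i in stars else " " for i in range(n))
-- ===== Notes on version B (the rewrite author's own statement) =====
-- stated objective: alternative
-- what changed: Instead of padding both strings and scanning them together, B first builds a set of '*' positions from each string via enumerate comprehensions, unions them, then renders the output over range(max(len(l1),len(l2))) by set membership; no padded intermediate strings are kept.
import Mathlib
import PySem

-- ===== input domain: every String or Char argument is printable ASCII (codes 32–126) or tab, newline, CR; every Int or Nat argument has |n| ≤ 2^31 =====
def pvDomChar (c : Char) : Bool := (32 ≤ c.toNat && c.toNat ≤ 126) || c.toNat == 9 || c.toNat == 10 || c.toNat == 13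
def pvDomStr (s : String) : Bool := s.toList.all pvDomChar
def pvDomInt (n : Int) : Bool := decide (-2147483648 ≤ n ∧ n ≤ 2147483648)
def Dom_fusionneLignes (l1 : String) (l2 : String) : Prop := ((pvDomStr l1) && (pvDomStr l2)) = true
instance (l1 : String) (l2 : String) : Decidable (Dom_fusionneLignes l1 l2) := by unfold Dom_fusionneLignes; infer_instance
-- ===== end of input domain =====

-- B builds a set of '*' positions from each string's enumerate, unions them, and renders
-- the output over range(max(len(l1),len(l2))) by set membership (objective: alternative).

-- ===== PORT A =====
-- the 'while len(l) < target: l += " "' loop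
def pvPadLoop (l : List Char) (target : Nat) : List Char :=
  if l.length < target then pvPadLoop (l ++ [' ']) target else l
termination_by target - l.length
decreasing_by simp [List.length_append]; omega

def fusionneLignes (l1 : String) (l2 : String) : String :=
  let a := pvPadLoop l1.toList l2.toList.length
  let b := pvPadLoop l2.toList a.length
  String.mk ((a.zip b).foldl
    (fun line p => line ++ [if p.1 = '*' ∨ p.2 = '*' then '*' else ' ']) [])

-- ===== PORT B =====
-- {i for i, c in enumerate(cs) if c == "*"}
def pvStarSet (cs : List Char) : PySem.Set Int :=
  PySem.Set.ofList ((PySem.List.enumerate cs 0).filterMap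
    (fun p => if p.2 = '*' then some p.1 else none))

def fusionneLignes_alt (l1 : String) (l2 : String) : String :=
  let stars := PySem.Set.union (pvStarSet l1.toList) (pvStarSet l2.toList)
  let n := max l1.toList.length l2.toList.length
  String.mk ((PySem.List.pyRange 0 (n : Int) 1).map
    (fun i => if PySem.Set.contains stars i then '*' else ' '))

-- ===== PRECONDITION & SPEC =====
def Spec_fusionneLignes (l1 : String) (l2 : String) (out : String) : Prop := out = fusionneLignes_alt l1 l2
instance (l1 : String) (l2 : String) (out : String) : Decidable (Spec_fusionneLignes l1 l2 out) := by unfold Spec_fusionneLignes; infer_instance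

-- ===== CLAIM (what is proved, stated in full; the proofs are below) =====
def Claim_equal_fusionneLignes : Prop := ∀ (l1 : String) (l2 : String), Dom_fusionneLignes l1 l2 → Spec_fusionneLignes l1 l2 (fusionneLignes l1 l2)

-- ===== LEMMAS AND PROOFS =====

theorem pvPadLoop_eq (l : List Char) (t : Nat) :
    pvPadLoop l t = l ++ List.replicate (t - l.length) ' ' := by
  rw [pvPadLoop]
  split
  · next h =>
    rw [pvPadLoop_eq (l ++ [' ']) t]
    simp [List.append_assoc]
    have : t - l.length = (t - (l.length + 1)) + 1 := by omega
    rw [this, List.replicate_succ]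
  · next h => simp; omega
termination_by t - l.length
decreasing_by simp [List.length_append]; omega

theorem pvFoldlAppend (l : List (Char × Char)) (init : List Char)
    (f : Char × Char → Char) :
    l.foldl (fun line p => line ++ [f p]) init = init ++ l.map f := by
  induction l generalizing init with
  | nil => simp
  | cons x xs ih => simp [List.foldl, ih]

theorem pvGetElemPad (l : List Char) (k i : Nat)
    (hi : i < (l ++ List.replicate k ' ').length) :
    (l ++ List.replicate k ' ')[i] = if h : i < l.length then l[i] else ' ' := by
  split
  · next h => rw [List.getElem_append_left h]
  · next h =>
    simp at hi
    rw [List.getElem_append_right (by omega)]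
    simp

-- membership in B's star set
theorem pvMemStarSet (cs : List Char) (i : Int) :
    i ∈ pvStarSet cs ↔ ∃ (k : Nat) (h : k < cs.length), i = (k : Int) ∧ cs[k] = '*' := by
  unfold pvStarSet
  rw [PySem.Set.mem_ofList, List.mem_filterMap]
  constructor
  · rintro ⟨p, hp, hf⟩
    rw [PySem.List.mem_enumerate_iff] at hp
    obtain ⟨k, hk, rfl⟩ := hp
    simp only at hf
    split at hf
    · next hc => exact ⟨k, hk, by simpa using hf.symm, hc⟩
    · exact absurd hf (by simp)
  · rintro ⟨k, hk, rfl, hc⟩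
    refine ⟨((k : Int), cs[k]), ?_, by simp [hc]⟩
    rw [PySem.List.mem_enumerate_iff]
    exact ⟨k, hk, by simp⟩

-- ===== VERDICT (by name: the statement is the Claim_ definition above) =====
theorem fusionneLignes_spec : Claim_equal_fusionneLignes := by
  unfold Claim_equal_fusionneLignes
  intro l1 l2 _
  unfold Spec_fusionneLignes fusionneLignes fusionneLignes_alt
  set a := l1.toList with ha
  set b := l2.toList with hb
  simp only [pvPadLoop_eq, pvFoldlAppend, List.nil_append]
  apply congrArg String.mk
  have hla : (a ++ List.replicate (b.length - a.length) ' ').length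
      = max a.length b.length := by simp; omega
  have hlb : (b ++ List.replicate (max a.length b.length - b.length) ' ').length
      = max a.length b.length := by simp
  rw [hla]
  apply List.ext_getElem
  · simp [hlb, PySem.List.length_pyRange_one]; omega
  · intro i h1 h2
    have hi : i < max a.length b.length := by
      simp [hlb] at h1; omega
    simp only [List.getElem_map, List.getElem_zip, PySem.List.getElem_pyRange_one]
    rw [pvGetElemPad, pvGetElemPad]
    have hmem : PySem.Set.contains
        (PySem.Set.union (pvStarSet a) (pvStarSet b)) ((0 : Int) + i) = true
        ↔ ((if h : i < a.length then a[i] else ' ') = '*'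
          ∨ (if h : i < b.length then b[i] else ' ') = '*') := by
      rw [PySem.Set.contains_iff, PySem.Set.mem_union, pvMemStarSet, pvMemStarSet]
      constructor
      · rintro (⟨k, hk, hik, hc⟩ | ⟨k, hk, hik, hc⟩)
        · have : i = k := by omega
          subst this
          exact Or.inl (by simp [hk, hc])
        · have : i = k := by omega
          subst this
          exact Or.inr (by simp [hk, hc])
      · rintro (h | h)
        · split at h
          · next hlt => exact Or.inl ⟨i, hlt, by omega, h⟩
          · exact absurd h (by decide)
        · split at h
          · next hlt => exact Or.inr ⟨i, hlt, by omega, h⟩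
          · exact absurd h (by decide)
    by_cases hc : ((if h : i < a.length then a[i] else ' ') = '*'
          ∨ (if h : i < b.length then b[i] else ' ') = '*')
    · rw [if_pos hc, if_pos (hmem.mpr hc)]
    · rw [if_neg hc, if_neg (fun hm => hc (hmem.mp hm))]
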